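-- pv_equiv track=rewrite | github.com/Tauzi/chaishu | chaishu_gui.py | normalize_outline_text
-- ===== SOURCE A (Python) =====
-- def normalize_outline_text(text: str) -> str:
--     lines = text.splitlines()
--     normalized: list[str] = []
--     index = 0
--     while index < len(lines):
--         line = lines[index]
--         if line.strip() == "-":
--             index += 1
--             while index < len(lines) and not lines[index].strip():
--                 index += 1
--             if index < len(lines):
--                 next_line = lines[index].strip()
--                 if next_line:
--                     normalized.append(f"- {next_line.lstrip('-').strip()}")
--                     index += 1
--                     continue
--             continue
--         if normalized and line.startswith((" ", "\t")) and normalized[-1].lstrip().startswith("- "):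
--             normalized[-1] = f"{normalized[-1].rstrip()} {line.strip()}"
--         else:
--             normalized.append(line)
--         index += 1
--     return "\n".join(normalized)
-- ===== SOURCE B (Python) =====
-- def _resolve_bullets(lines):
--     # Stage 1: rewrite each dash marker (consuming blanks and the body line) into a
--     # ready-made bullet line; other lines pass through. Recursion on the suffix.
--     if not lines:
--         return []
--     head, rest = lines[0], lines[1:]
--     if head.strip() != "-":
--         return [head] + _resolve_bullets(rest)
--     j = next((k for k, l in enumerate(rest) if l.strip()), None)
--     if j is None:
--         return []
--     body = rest[j].strip()
--     return [f"- {body.lstrip('-').strip()}"] + _resolve_bullets(rest[j + 1:])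
--
--
-- def normalize_outline_text(text: str) -> str:
--     # Two staged passes instead of one indexed loop: stage 1 resolves dash markers,
--     # stage 2 folds continuation lines into the preceding bullet.
--     normalized: list[str] = []
--     for line in _resolve_bullets(text.splitlines()):
--         if normalized and line.startswith((" ", "\t")) and normalized[-1].lstrip().startswith("- "):
--             normalized[-1] = f"{normalized[-1].rstrip()} {line.strip()}"
--         else:
--             normalized.append(line)
--     return "\n".join(normalized)
-- ===== Notes on version B (the rewrite author's own statement) =====
-- stated objective: alternative
-- what changed: Replaced A's single indexed while loop (with a nested blank-skipping inner while and manual index bookkeeping) by two staged passes: a recursive pass that resolves dash markers into ready-made bullet lines, then a separate fold that merges continuation lines into the preceding bullet.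
import Mathlib
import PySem

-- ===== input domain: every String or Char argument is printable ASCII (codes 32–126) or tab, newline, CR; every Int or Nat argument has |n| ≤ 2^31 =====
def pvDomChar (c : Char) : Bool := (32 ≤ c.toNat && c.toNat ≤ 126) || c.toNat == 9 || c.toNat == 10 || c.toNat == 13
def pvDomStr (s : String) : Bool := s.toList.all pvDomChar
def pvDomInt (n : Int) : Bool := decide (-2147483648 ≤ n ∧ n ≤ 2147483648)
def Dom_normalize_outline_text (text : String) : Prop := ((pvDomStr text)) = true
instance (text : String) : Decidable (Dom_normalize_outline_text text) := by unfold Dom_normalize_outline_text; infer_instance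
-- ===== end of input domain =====

-- B replaces A's single indexed while loop by two staged passes: a recursive pass that
-- resolves dash markers into ready-made bullet lines, then a fold that merges
-- continuation lines into the preceding bullet (objective: alternative decomposition).

-- ===== PORT A =====

-- f"- {next_line.lstrip('-').strip()}" ; lstrip('-') is exactly dropWhile (· == '-')
def pvBullet (next_line : List Char) : List Char :=
  ['-', ' '] ++ PySem.Chars.strip (next_line.dropWhile (· == '-'))

-- the merged continuation entry: f"{last.rstrip()} {line.strip()}"
def pvMerge (last line : List Char) : List Char :=
  PySem.Chars.rstrip last ++ [' '] ++ PySem.Chars.strip line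

-- the merge guard: normalized and line.startswith((" ", "\t")) and normalized[-1].lstrip().startswith("- ")
def pvMergeCond (norm : List (List Char)) (line : List Char) : Bool :=
  decide (norm ≠ []) &&
    (PySem.Chars.startswith line [' '] || PySem.Chars.startswith line ['\t']) &&
    PySem.Chars.startswith (PySem.Chars.lstrip (norm.getLastD [])) ['-', ' ']

-- A's outer while over an index, as recursion on the unprocessed suffix of `lines`;
-- the inner while that skips blank lines is dropWhile.
def pvLoopA (norm : List (List Char)) (lines : List (List Char)) : List (List Char) :=
  match lines with
  | [] => norm
  | line :: rest =>
    if PySem.Chars.strip line = ['-'] then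
      match _h : rest.dropWhile (fun l => PySem.Chars.strip l = []) with
      | [] => norm                                   -- index reached len(lines): outer loop ends
      | nl :: rest3 =>
        let next_line := PySem.Chars.strip nl
        if next_line ≠ [] then pvLoopA (norm ++ [pvBullet next_line]) rest3
        else pvLoopA norm rest3                      -- unreachable: dropWhile's head has a non-empty strip
    else if pvMergeCond norm line then
      pvLoopA (norm.dropLast ++ [pvMerge (norm.getLastD []) line]) rest
    else
      pvLoopA (norm ++ [line]) rest
termination_by lines.length
decreasing_by
  · have h1 : (rest.dropWhile (fun l => PySem.Chars.strip l = [])).length ≤ rest.length :=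
      rest.length_dropWhile_le _
    rw [_h] at h1; simp at h1 ⊢; omega
  · have h1 : (rest.dropWhile (fun l => PySem.Chars.strip l = [])).length ≤ rest.length :=
      rest.length_dropWhile_le _
    rw [_h] at h1; simp at h1 ⊢; omega
  · simp
  · simp

def normalize_outline_text (text : String) : String :=
  String.ofList (PySem.Chars.join ['\n'] (pvLoopA [] (PySem.Chars.splitlines text.toList)))

-- ===== PORT B =====

-- stage 1: `next((k for k,l in enumerate(rest) if l.strip()), None)` finds the first
-- non-blank line, i.e. dropWhile over the blank prefix; recursion on the suffix.
def pvResolveBullets (lines : List (List Char)) : List (List Char) :=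
  match lines with
  | [] => []
  | head :: rest =>
    if PySem.Chars.strip head ≠ ['-'] then head :: pvResolveBullets rest
    else
      match _h : rest.dropWhile (fun l => PySem.Chars.strip l = []) with
      | [] => []
      | nl :: rest' => pvBullet (PySem.Chars.strip nl) :: pvResolveBullets rest'
termination_by lines.length
decreasing_by
  · simp
  · have h1 : (rest.dropWhile (fun l => PySem.Chars.strip l = [])).length ≤ rest.length :=
      rest.length_dropWhile_le _
    rw [_h] at h1; simp at h1 ⊢; omega

-- stage 2: one step of the continuation-merging fold
def pvStep2 (norm : List (List Char)) (line : List Char) : List (List Char) :=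
  if pvMergeCond norm line then norm.dropLast ++ [pvMerge (norm.getLastD []) line]
  else norm ++ [line]

def normalize_outline_text_alt (text : String) : String :=
  String.ofList (PySem.Chars.join ['\n']
    ((pvResolveBullets (PySem.Chars.splitlines text.toList)).foldl pvStep2 []))

-- ===== PRECONDITION & SPEC =====
def Spec_normalize_outline_text (text : String) (out : String) : Prop := out = normalize_outline_text_alt text
instance (text : String) (out : String) : Decidable (Spec_normalize_outline_text text out) := by unfold Spec_normalize_outline_text; infer_instance

-- ===== CLAIM (what is proved, stated in full; the proofs are below) =====
def Claim_equal_normalize_outline_text : Prop := ∀ (text : String), Dom_normalize_outline_text text → Spec_normalize_outline_text text (normalize_outline_text text)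

-- ===== LEMMAS AND PROOFS =====

-- a freshly made bullet line starts with '-', so the continuation-merge guard rejects it
theorem mergeCond_bullet (norm : List (List Char)) (x : List Char) :
    pvMergeCond norm (pvBullet x) = false := by
  simp [pvMergeCond, pvBullet, PySem.Chars.startswith]

-- Main invariant: A's indexed loop equals stage 2's fold over stage 1's output.
theorem loopA_eq_staged (lines : List (List Char)) (norm : List (List Char)) :
    pvLoopA norm lines = (pvResolveBullets lines).foldl pvStep2 norm := by
  induction hn : lines.length using Nat.strong_induction_on generalizing lines norm with
  | _ n ih =>
  match lines with
  | [] => simp [pvLoopA, pvResolveBullets]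
  | line :: rest =>
    simp only [List.length_cons] at hn
    by_cases hb : PySem.Chars.strip line = ['-']
    · rw [pvLoopA, if_pos hb, pvResolveBullets]
      simp only [hb, ne_eq, not_true_eq_false, if_false]
      have hlen : (rest.dropWhile (fun l => PySem.Chars.strip l = [])).length ≤ rest.length :=
        rest.length_dropWhile_le _
      rcases hdw : rest.dropWhile (fun l => PySem.Chars.strip l = []) with _ | ⟨nl, rest3⟩
      · simp
      · have hnl : PySem.Chars.strip nl ≠ [] := by
          have := List.dropWhile_get_zero_not (p := fun l => PySem.Chars.strip l = []) rest
            (by rw [hdw]; simp)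
          simpa [hdw] using this
        rw [hdw] at hlen
        simp only [List.length_cons] at hlen
        simp only [hnl, not_false_eq_true, if_true, List.foldl_cons]
        have hstep : pvStep2 norm (pvBullet (PySem.Chars.strip nl)) =
            norm ++ [pvBullet (PySem.Chars.strip nl)] := by
          simp [pvStep2, mergeCond_bullet]
        rw [hstep]
        exact ih rest3.length (by omega) rest3 _ rfl
    · rw [pvLoopA, if_neg hb, pvResolveBullets]
      simp only [hb, ne_eq, not_false_eq_true, if_true, List.foldl_cons]
      by_cases hm : pvMergeCond norm line = true
      · rw [if_pos hm]
        have hstep : pvStep2 norm line =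
            norm.dropLast ++ [pvMerge (norm.getLastD []) line] := by simp [pvStep2, hm]
        rw [hstep]
        exact ih rest.length (by omega) rest _ rfl
      · rw [if_neg hm]
        have hstep : pvStep2 norm line = norm ++ [line] := by
          simp [pvStep2, hm]
        rw [hstep]
        exact ih rest.length (by omega) rest _ rfl

-- ===== VERDICT (by name: the statement is the Claim_ definition above) =====
theorem normalize_outline_text_spec : Claim_equal_normalize_outline_text := by
  intro text _
  unfold Spec_normalize_outline_text normalize_outline_text normalize_outline_text_alt
  rw [loopA_eq_staged]
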